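-- pv_equiv track=rewrite | github.com/wk981/wk-ntu-fyp | script/utils/WebCoursesScrapperManager.py | _handle_metadata_category
-- ===== SOURCE A (Python) =====
-- learning_product_list = [
--     "Guided Project",
--     "Course",
--     "Project",
--     "Specialization",
--     "Professional Certificate",
--     "MasterTrack Certificate",
--     "Degree",
--     "Postgraduate Diploma",
--     "Graduate Certificate",
--     "University Certificate"
-- ]
--
-- difficulty_list = ["Beginner", "Intermediate", "Advanced", "Mixed"]
--
-- def _handle_metadata_category(metadata_list):
--     # Initialize course_data with None for missing values
--     course_data = {
--         'learning_product': None,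
--         'difficulty': None,
--         'duration': None
--     }
--
--     for metadata in metadata_list:
--         metadata_lower = metadata.lower()
--
--         # Check for matches in lowercase lists
--         if metadata_lower in [item.lower() for item in learning_product_list]:
--             course_data['learning_product'] = metadata
--         elif metadata_lower in [item.lower() for item in difficulty_list]:
--             course_data['difficulty'] = metadata
--         else:
--             course_data['duration'] = metadata
--
--     return course_data
-- ===== SOURCE B (Python) =====
-- learning_product_list = [
--     "Guided Project",
--     "Course",
--     "Project",
--     "Specialization",
--     "Professional Certificate",
--     "MasterTrack Certificate",
--     "Degree",
--     "Postgraduate Diploma",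
--     "Graduate Certificate",
--     "University Certificate"
-- ]
--
-- difficulty_list = ["Beginner", "Intermediate", "Advanced", "Mixed"]
--
--
-- def _handle_metadata_category(metadata_list):
--     products = {s.lower() for s in learning_product_list}
--     difficulties = {s.lower() for s in difficulty_list}
--
--     def last(pred):
--         # last element whose lowercase form satisfies pred (last-wins), else None
--         return next((m for m in reversed(metadata_list) if pred(m.lower())), None)
--
--     return {
--         'learning_product': last(lambda s: s in products),
--         'difficulty': last(lambda s: s in difficulties),
--         'duration': last(lambda s: s not in products and s not in difficulties),
--     }
-- ===== Notes on version B (the rewrite author's own statement) =====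
-- stated objective: faster
-- what changed: Replaces the single classifying loop that re-lowers both category lists on every iteration and mutates a dict by two lowercase membership sets built once plus three independent reverse scans, each picking the last qualifying element directly.
import Mathlib
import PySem

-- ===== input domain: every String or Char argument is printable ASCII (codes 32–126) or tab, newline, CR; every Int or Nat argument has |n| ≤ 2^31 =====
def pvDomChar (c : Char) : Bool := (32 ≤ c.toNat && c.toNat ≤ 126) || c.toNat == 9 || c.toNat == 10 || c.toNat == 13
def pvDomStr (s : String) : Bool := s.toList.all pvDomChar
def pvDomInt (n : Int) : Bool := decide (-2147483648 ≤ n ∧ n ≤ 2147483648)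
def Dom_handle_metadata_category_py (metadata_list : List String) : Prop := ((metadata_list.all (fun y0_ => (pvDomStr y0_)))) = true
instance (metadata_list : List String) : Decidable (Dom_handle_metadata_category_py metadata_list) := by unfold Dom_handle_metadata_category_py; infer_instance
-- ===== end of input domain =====

-- B replaces the single classifying loop over a mutable dict by two lowercase membership
-- sets built once and three independent reverse scans (objective: faster; measured).

def learning_product_list : List String :=
  ["Guided Project", "Course", "Project", "Specialization", "Professional Certificate",
   "MasterTrack Certificate", "Degree", "Postgraduate Diploma", "Graduate Certificate",
   "University Certificate"]

def difficulty_list : List String := ["Beginner", "Intermediate", "Advanced", "Mixed"]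

-- ===== PORT A =====
-- Literal port: dict initialised with three None fields; for each metadata the lowered
-- category lists are rebuilt and membership decides which key is overwritten.
def handle_metadata_category_py (metadata_list : List String) : List (String × Option String) :=
  let course_data : PySem.Dict String (Option String) :=
    PySem.Dict.ofList [("learning_product", none), ("difficulty", none), ("duration", none)]
  let final := metadata_list.foldl (fun course_data metadata =>
    let metadata_lower := PySem.Str.lower metadata
    if (learning_product_list.map (fun item => PySem.Str.lower item)).contains metadata_lower then
      course_data.insert "learning_product" (some metadata)
    else if (difficulty_list.map (fun item => PySem.Str.lower item)).contains metadata_lower then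
      course_data.insert "difficulty" (some metadata)
    else
      course_data.insert "duration" (some metadata)) course_data
  final.items

-- ===== PORT B =====
def handle_metadata_category_py_alt (metadata_list : List String) : List (String × Option String) :=
  let products : PySem.Set String := PySem.Set.ofList (learning_product_list.map PySem.Str.lower)
  let difficulties : PySem.Set String := PySem.Set.ofList (difficulty_list.map PySem.Str.lower)
  let last := fun (pred : String → Bool) =>
    metadata_list.reverse.find? (fun m => pred (PySem.Str.lower m))
  [("learning_product", last (fun s => PySem.Set.contains products s)),
   ("difficulty", last (fun s => PySem.Set.contains difficulties s)),
   ("duration", last (fun s => !PySem.Set.contains products s && !PySem.Set.contains difficulties s))]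

-- ===== PRECONDITION & SPEC =====
def Spec_handle_metadata_category_py (metadata_list : List String) (out : List (String × Option String)) : Prop := out = handle_metadata_category_py_alt metadata_list
instance (metadata_list : List String) (out : List (String × Option String)) : Decidable (Spec_handle_metadata_category_py metadata_list out) := by unfold Spec_handle_metadata_category_py; infer_instance

-- ===== CLAIM (what is proved, stated in full; the proofs are below) =====
def Claim_equal_handle_metadata_category_py : Prop := ∀ (metadata_list : List String), Dom_handle_metadata_category_py metadata_list → Spec_handle_metadata_category_py metadata_list (handle_metadata_category_py metadata_list)

-- ===== LEMMAS AND PROOFS =====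

-- proof-only helpers: A's loop body and the three classifying predicates, named
def stepA (course_data : PySem.Dict String (Option String)) (metadata : String) :
    PySem.Dict String (Option String) :=
  let metadata_lower := PySem.Str.lower metadata
  if (learning_product_list.map (fun item => PySem.Str.lower item)).contains metadata_lower then
    course_data.insert "learning_product" (some metadata)
  else if (difficulty_list.map (fun item => PySem.Str.lower item)).contains metadata_lower then
    course_data.insert "difficulty" (some metadata)
  else
    course_data.insert "duration" (some metadata)

def pA (m : String) : Bool :=
  (learning_product_list.map (fun item => PySem.Str.lower item)).contains (PySem.Str.lower m)
def pB (m : String) : Bool :=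
  (difficulty_list.map (fun item => PySem.Str.lower item)).contains (PySem.Str.lower m)
def pC (m : String) : Bool := !pA m && !pB m

theorem lowered_products :
    learning_product_list.map (fun item => PySem.Str.lower item) =
      ["guided project", "course", "project", "specialization", "professional certificate",
       "mastertrack certificate", "degree", "postgraduate diploma", "graduate certificate",
       "university certificate"] := by decide

theorem lowered_difficulties :
    difficulty_list.map (fun item => PySem.Str.lower item) =
      ["beginner", "intermediate", "advanced", "mixed"] := by decide

-- the two lowered category lists are disjoint
theorem pB_eq_false_of_pA (s : String) (h : pA s = true) : pB s = false := by
  unfold pA at h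
  unfold pB
  rw [lowered_products] at h
  rw [lowered_difficulties]
  simp only [List.contains_eq_mem, decide_eq_true_eq, List.mem_cons, List.not_mem_nil, or_false] at h ⊢
  rcases h with h | h | h | h | h | h | h | h | h | h <;> rw [h] <;> decide

-- loop invariant: folding A's body from any three-field state yields, per field,
-- the last matching element (stored as `some _`) or else the starting value
theorem foldl_stepA (xs : List String) (a b c : Option String) :
    xs.foldl stepA
      (PySem.Dict.mk [("learning_product", a), ("difficulty", b), ("duration", c)]) =
    PySem.Dict.mk
      [("learning_product", (xs.reverse.find? (fun m => pA m)).or a),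
       ("difficulty", (xs.reverse.find? (fun m => pB m)).or b),
       ("duration", (xs.reverse.find? (fun m => pC m)).or c)] := by
  induction xs generalizing a b c with
  | nil => simp
  | cons x xs ih =>
    rw [List.foldl_cons, List.reverse_cons]
    by_cases h1 : pA x
    · have h2 : pB x = false := pB_eq_false_of_pA x h1
      have hstep : stepA (PySem.Dict.mk [("learning_product", a), ("difficulty", b), ("duration", c)]) x
          = PySem.Dict.mk [("learning_product", some x), ("difficulty", b), ("duration", c)] := by
        unfold stepA
        unfold pA at h1
        simp only [h1, if_true]
        simp [PySem.Dict.insert]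
      rw [hstep, ih]
      simp [List.find?_append, h1, h2, pC]
    · by_cases h2 : pB x
      · have hstep : stepA (PySem.Dict.mk [("learning_product", a), ("difficulty", b), ("duration", c)]) x
            = PySem.Dict.mk [("learning_product", a), ("difficulty", some x), ("duration", c)] := by
          unfold stepA
          unfold pA at h1
          unfold pB at h2
          simp only [h1, h2]
          simp [PySem.Dict.insert]
        rw [hstep, ih]
        simp [List.find?_append, h1, h2, pC]
      · have hstep : stepA (PySem.Dict.mk [("learning_product", a), ("difficulty", b), ("duration", c)]) x
            = PySem.Dict.mk [("learning_product", a), ("difficulty", b), ("duration", some x)] := by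
          unfold stepA
          unfold pA at h1
          unfold pB at h2
          simp only [h1, h2]
          simp [PySem.Dict.insert]
        rw [hstep, ih]
        simp [List.find?_append, h1, h2, pC]

-- ===== VERDICT (by name: the statement is the Claim_ definition above) =====
theorem handle_metadata_category_py_spec : Claim_equal_handle_metadata_category_py := by
  intro metadata_list _
  unfold Spec_handle_metadata_category_py handle_metadata_category_py handle_metadata_category_py_alt
  have hd : PySem.Dict.ofList
      [("learning_product", (none : Option String)), ("difficulty", none), ("duration", none)]
      = PySem.Dict.mk [("learning_product", none), ("difficulty", none), ("duration", none)] := by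
    decide
  dsimp only
  rw [hd]
  have hstep : (fun (course_data : PySem.Dict String (Option String)) (metadata : String) =>
      let metadata_lower := PySem.Str.lower metadata
      if (learning_product_list.map (fun item => PySem.Str.lower item)).contains metadata_lower then
        course_data.insert "learning_product" (some metadata)
      else if (difficulty_list.map (fun item => PySem.Str.lower item)).contains metadata_lower then
        course_data.insert "difficulty" (some metadata)
      else
        course_data.insert "duration" (some metadata)) = stepA := rfl
  rw [hstep, foldl_stepA]
  have hpA : ∀ m, PySem.Set.contains (PySem.Set.ofList (learning_product_list.map PySem.Str.lower))
      (PySem.Str.lower m) = pA m := by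
    intro m; unfold pA; simp [PySem.Set.contains]
  have hpB : ∀ m, PySem.Set.contains (PySem.Set.ofList (difficulty_list.map PySem.Str.lower))
      (PySem.Str.lower m) = pB m := by
    intro m; unfold pB; simp [PySem.Set.contains]
  simp only [hpA, hpB, pC, Option.or_none]
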